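-- pv_equiv track=rewrite | github.com/kratsg/stare | src/stare/dsl/_extractor.py | _group_fields
-- ===== SOURCE A (Python) =====
-- def _group_fields(fields: list[str]) -> list[tuple[str, list[str]]]:
--     groups: dict[str, list[str]] = {}
--     for f in fields:
--         key = f.split(".")[0] if "." in f else ""
--         groups.setdefault(key, []).append(f)
--     result: list[tuple[str, list[str]]] = []
--     if "" in groups:
--         result.append(("Top-level", groups[""]))
--     for key in sorted(k for k in groups if k):
--         result.append((f"`{key}`", groups[key]))
--     return result
-- ===== SOURCE B (Python) =====
-- def _group_fields(fields: list[str]) -> list[tuple[str, list[str]]]: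
--     def key(f: str) -> str:
--         return f.split(".")[0] if "." in f else ""
--     keys = sorted({key(f) for f in fields})
--     return [
--         ("Top-level" if k == "" else f"`{k}`", [f for f in fields if key(f) == k])
--         for k in keys
--     ]
-- ===== Notes on version B (the rewrite author's own statement) =====
-- stated objective: simpler
-- what changed: Replaces the one-pass dict-of-lists accumulation plus special-cased assembly with a sorted set of prefix keys and one filter comprehension per key; since '' sorts before every non-empty key the Top-level group lands first automatically.
import Mathlib
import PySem

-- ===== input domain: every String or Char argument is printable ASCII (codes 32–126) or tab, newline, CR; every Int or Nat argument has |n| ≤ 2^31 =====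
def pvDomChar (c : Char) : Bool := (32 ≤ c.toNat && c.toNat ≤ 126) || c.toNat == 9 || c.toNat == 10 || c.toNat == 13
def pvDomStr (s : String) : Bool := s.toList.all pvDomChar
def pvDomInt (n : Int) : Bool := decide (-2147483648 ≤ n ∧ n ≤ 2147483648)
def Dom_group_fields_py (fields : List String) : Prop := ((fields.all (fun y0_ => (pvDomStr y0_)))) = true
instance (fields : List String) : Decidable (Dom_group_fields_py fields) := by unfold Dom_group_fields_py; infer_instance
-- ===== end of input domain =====

-- B replaces A's dict-of-lists accumulation with a sorted set of prefix keys and one filter per key (simpler; same return value proved).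


-- ===== PORT A =====
-- key = f.split(".")[0] if "." in f else ""   (the same expression occurs in both Pythons)
def pvKey (f : String) : String :=
  if PySem.Str.isIn "." f then ((PySem.Str.split? f ".").getD []).getD 0 "" else ""

def group_fields_py (fields : List String) : List (String × List String) :=
  let groups : PySem.Dict String (List String) :=
    fields.foldl (fun d f => d.modify (pvKey f) [] (fun v => v ++ [f])) PySem.Dict.empty
  (if groups.contains "" then [("Top-level", groups.getD "" [])] else []) ++
    (PySem.List.sorted (groups.keys.filter (fun k => k != "")) (fun k => k) false).map
      (fun k => ("`" ++ k ++ "`", groups.getD k []))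

-- ===== PORT B =====
def group_fields_py_alt (fields : List String) : List (String × List String) :=
  let keys := PySem.List.sorted (PySem.Set.ofList (fields.map pvKey)) (fun k => k) false
  keys.map (fun k =>
    (if k == "" then "Top-level" else "`" ++ k ++ "`",
     fields.filter (fun f => pvKey f == k)))

-- ===== PRECONDITION & SPEC =====
def Spec_group_fields_py (fields : List String) (out : List (String × List String)) : Prop := out = group_fields_py_alt fields
instance (fields : List String) (out : List (String × List String)) : Decidable (Spec_group_fields_py fields out) := by unfold Spec_group_fields_py; infer_instance

-- ===== CLAIM (what is proved, stated in full; the proofs are below) =====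
def Claim_equal_group_fields_py : Prop := ∀ (fields : List String), Dom_group_fields_py fields → Spec_group_fields_py fields (group_fields_py fields)

-- ===== LEMMAS AND PROOFS =====

-- A's dict lookup at key k is the per-key filter of the fields list.
theorem pv_getD_groups (fields : List String) (k : String) :
    (fields.foldl (fun d f => d.modify (pvKey f) [] (fun v => v ++ [f]))
      (PySem.Dict.empty : PySem.Dict String (List String))).getD k []
      = fields.filter (fun f => pvKey f == k) := by
  have h := PySem.Dict.getD_foldl_modify_append
    (l := fields.map (fun f => (pvKey f, f))) (d := (PySem.Dict.empty : PySem.Dict String (List String))) (c := k)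
  rw [List.foldl_map] at h
  simp only [PySem.Dict.getD_empty, List.nil_append] at h
  rw [h, List.filter_map, List.map_map]
  simp [Function.comp_def]

-- A's dict keys are the distinct prefix keys in first-occurrence order.
theorem pv_keys_groups (fields : List String) :
    (fields.foldl (fun d f => d.modify (pvKey f) [] (fun v => v ++ [f]))
      (PySem.Dict.empty : PySem.Dict String (List String))).keys
      = PySem.Set.ofList (fields.map pvKey) := by
  rw [PySem.Dict.keys_foldl_modify_key]
  simp [PySem.Set.update_nil_left, PySem.Dict.keys_empty]

-- "" is strictly below every non-empty string in Python's string order.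
theorem pv_empty_lt (s : String) (h : s ≠ "") : "" < s := by
  rw [String.lt_iff_toList_lt]
  have : s.toList ≠ [] := by simpa [← String.toList_eq_nil_iff] using h
  cases hs : s.toList with
  | nil => exact absurd hs this
  | cons c cs => simp [String.toList_empty]

-- sorting distinct keys = optional "" head ++ sorted non-empty keys (why B's order matches A's).
theorem pv_sorted_split (K : List String) (hnd : K.Nodup) :
    PySem.List.sorted K (fun k => k) false
      = (if "" ∈ K then [""] else []) ++
        PySem.List.sorted (K.filter (fun k => k != "")) (fun k => k) false := by
  have hndf : (K.filter (fun k => k != "")).Nodup := hnd.filter _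
  have hps := PySem.List.sorted_perm (K.filter (fun k => k != "")) (fun k => k) false
  have hnds : (PySem.List.sorted (K.filter (fun k => k != "")) (fun k => k) false).Nodup :=
    hps.symm.nodup hndf
  have hmem : ∀ y ∈ PySem.List.sorted (K.filter (fun k => k != "")) (fun k => k) false, y ≠ "" := by
    intro y hy
    have := (PySem.List.mem_sorted _ _ _ _).mp hy
    simpa using (List.mem_filter.mp this).2
  have hpw : (PySem.List.sorted (K.filter (fun k => k != "")) (fun k => k) false).Pairwise (· < ·) := by
    have h1 := PySem.List.sorted_pairwise (K.filter (fun k => k != "")) (fun k => k)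
    exact (h1.and hnds).imp (fun h => lt_of_le_of_ne h.1 h.2)
  by_cases h : "" ∈ K
  · simp only [h, if_pos, List.singleton_append]
    apply PySem.List.sorted_eq_of_perm_of_pairwise_lt
    · have p1 : ("" :: PySem.List.sorted (K.filter (fun k => k != "")) (fun k => k) false).Perm
          ("" :: K.filter (fun k => k != "")) := hps.cons ""
      have hfb : K.filter (· == "") = [""] := by
        rw [List.filter_beq, List.count_eq_one_of_mem hnd h, List.replicate_one]
      have he : ("" :: K.filter (fun k => k != ""))
          = K.filter (· == "") ++ K.filter (fun k => !(k == "")) := by simp [hfb, bne]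
      have p2 : ("" :: K.filter (fun k => k != "")).Perm K := by
        rw [he]; exact List.filter_append_perm _ K
      exact p1.trans p2
    · exact hpw.cons (fun y hy => pv_empty_lt y (hmem y hy))
  · have hf : K.filter (fun k => k != "") = K :=
      List.filter_eq_self.mpr (fun x hx => by simp; rintro rfl; exact h hx)
    simp [h, hf]

-- ===== VERDICT (by name: the statement is the Claim_ definition above) =====
theorem group_fields_py_spec : Claim_equal_group_fields_py := by
  intro fields _
  show group_fields_py fields = group_fields_py_alt fields
  unfold group_fields_py group_fields_py_alt
  simp only [pv_keys_groups, pv_getD_groups, PySem.Dict.contains_eq_decide_mem_keys]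
  rw [pv_sorted_split _ (PySem.Set.nodup_ofList _), List.map_append]
  by_cases hm : "" ∈ PySem.Set.ofList (fields.map pvKey)
  · simp only [hm, decide_true, if_true, List.map_cons, List.map_nil]
    congr 1
    apply List.map_congr_left
    intro k hk
    have hne : k ≠ "" := by
      have := (PySem.List.mem_sorted _ _ _ _).mp hk
      simpa using (List.mem_filter.mp this).2
    simp [hne]
  · simp only [hm, decide_false, if_false, List.map_nil, List.nil_append]
    apply List.map_congr_left
    intro k hk
    have hne : k ≠ "" := by
      have := (PySem.List.mem_sorted _ _ _ _).mp hk
      simpa using (List.mem_filter.mp this).2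
    simp [hne]
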